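-- pv_equiv track=rewrite | github.com/MarouaneBenbetka/Dependence-Driven-Quantum-Mapping | src/qlosure/graph/graph.py | compute_dependencies_length_old
-- ===== SOURCE A (Python) =====
-- def compute_dependencies_length_old(graph):
--     memo = {}
--
--     def dfs(node):
--         if node in memo:
--             return memo[node]
--         closure = set()
--         for neighbor in graph.get(node, []):
--             closure.add(neighbor)
--             closure |= dfs(neighbor)
--         memo[node] = closure
--         return closure
--
--     dependencies_length = {}
--     for node in graph:
--         dependencies_length[node] = len(dfs(node))
--     return dependencies_length
-- ===== SOURCE B (Python) =====
-- def compute_dependencies_length_old(graph):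
--     # Iterative least-fixpoint computation of the transitive closure:
--     # start each node's closure at its direct neighbours and repeatedly fold
--     # neighbours' closures in until nothing grows, then report the sizes.
--     closure = {node: set(neighbors) for node, neighbors in graph.items()}
--     changed = True
--     while changed:
--         changed = False
--         new = {}
--         for node, s in closure.items():
--             t = set(s)
--             for m in s:
--                 t |= closure.get(m, set())
--             if len(t) != len(s):
--                 changed = True
--             new[node] = t
--         closure = new
--     return {node: len(s) for node, s in closure.items()}
-- ===== Notes on version B (the rewrite author's own statement) =====
-- stated objective: alternative
-- what changed: A computes each node's transitive closure by memoized recursive DFS; B instead computes all closures simultaneously by an iterative least-fixpoint pass (start every node at its direct neighbours, repeatedly fold neighbours' closures in until a whole pass changes nothing), then reports the sizes.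
import Mathlib
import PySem

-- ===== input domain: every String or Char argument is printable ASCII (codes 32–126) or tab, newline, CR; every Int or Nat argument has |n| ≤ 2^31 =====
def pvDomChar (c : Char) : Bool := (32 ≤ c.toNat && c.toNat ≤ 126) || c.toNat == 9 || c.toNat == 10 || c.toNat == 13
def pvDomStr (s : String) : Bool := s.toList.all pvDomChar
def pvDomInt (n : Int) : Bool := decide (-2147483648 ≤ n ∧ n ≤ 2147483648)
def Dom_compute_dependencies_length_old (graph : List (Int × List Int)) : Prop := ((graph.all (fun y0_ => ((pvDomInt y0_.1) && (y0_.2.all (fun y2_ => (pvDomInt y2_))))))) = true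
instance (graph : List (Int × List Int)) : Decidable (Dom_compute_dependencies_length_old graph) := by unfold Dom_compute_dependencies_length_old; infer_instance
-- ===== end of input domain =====

-- B replaces A's memoized recursive DFS by an iterative least-fixpoint computation of the
-- transitive closure (repeatedly folding neighbours' closures in until nothing grows);
-- objective: alternative — a genuinely different algorithm, not claimed faster.

-- fuel guard shared by both ports: total number of neighbour entries (an upper bound used
-- only to make the Lean recursions total; the proofs show it is never exhausted on Pre_)
def pvSumLens (graph : List (Int × List Int)) : Nat := (graph.map (fun p => p.2.length)).sum

-- ===== PORT A =====  (memoized recursive dfs; memo threaded through the fold)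
def pvDfsA (g : PySem.Dict Int (List Int)) :
    Nat → PySem.Dict Int (PySem.Set Int) → Int → PySem.Dict Int (PySem.Set Int) × PySem.Set Int
  | 0, memo, _ => (memo, PySem.Set.empty)   -- fuel guard only; never reached under Pre_
  | fuel+1, memo, node =>
    match memo.get? node with
    | some s => (memo, s)
    | none =>
      let r := (g.getD node []).foldl
        (fun (p : PySem.Dict Int (PySem.Set Int) × PySem.Set Int) nb =>
          let q := pvDfsA g fuel p.1 nb
          (q.1, PySem.Set.union (PySem.Set.add p.2 nb) q.2))
        (memo, PySem.Set.empty)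
      (r.1.insert node r.2, r.2)

def compute_dependencies_length_old (graph : List (Int × List Int)) : List (Int × Int) :=
  let g := PySem.Dict.ofList graph
  let r := g.keys.foldl
    (fun (p : PySem.Dict Int (PySem.Set Int) × PySem.Dict Int Int) node =>
      let q := pvDfsA g (pvSumLens graph + 1) p.1 node
      (q.1, p.2.insert node (PySem.Set.len q.2)))
    (PySem.Dict.empty, PySem.Dict.empty)
  r.2.items

-- ===== PORT B =====  (iterative fixpoint: grow every node's closure until a whole pass changes nothing)
def pvStep (M : PySem.Dict Int (PySem.Set Int)) : PySem.Dict Int (PySem.Set Int) × Bool :=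
  M.items.foldl
    (fun (p : PySem.Dict Int (PySem.Set Int) × Bool) kv =>
      let t := kv.2.foldl (fun t m => PySem.Set.union t (M.getD m PySem.Set.empty)) (PySem.Set.ofList kv.2)
      (p.1.insert kv.1 t, p.2 || !(PySem.Set.len t == PySem.Set.len kv.2)))
    (PySem.Dict.empty, false)

def pvLoopB : Nat → PySem.Dict Int (PySem.Set Int) → PySem.Dict Int (PySem.Set Int)
  | 0, M => M   -- fuel guard only; the proofs show the loop always exits earlier
  | fuel+1, M =>
    let r := pvStep M
    if r.2 then pvLoopB fuel r.1 else r.1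

def compute_dependencies_length_old_alt (graph : List (Int × List Int)) : List (Int × Int) :=
  let g := PySem.Dict.ofList graph
  let M0 := g.items.foldl
    (fun (d : PySem.Dict Int (PySem.Set Int)) kv => d.insert kv.1 (PySem.Set.ofList kv.2))
    PySem.Dict.empty
  let R := pvLoopB (graph.length * pvSumLens graph + 2) M0
  R.items.map (fun kv => (kv.1, PySem.Set.len kv.2))

-- ===== PRECONDITION & SPEC =====
-- Spec-side vocabulary (used by Pre_): pvSucc g n = n's neighbour list; pvFuel is a step
-- bound large enough that reachability has saturated (proved below).
def pvSucc (g : PySem.Dict Int (List Int)) (n : Int) : List Int := g.getD n []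

def pvFuel (graph : List (Int × List Int)) : Nat :=
  graph.length * pvSumLens graph + pvSumLens graph + 1

-- Efficiently evaluable form of the closure used by Pre_: a table of closure sets for all
-- keys at once, squared pvP2 times (doubling), so deciding Pre_ is polynomial; it is proved
-- below (pv_clos_mem) to have exactly the members of pvCC.
def pvDStep (T : PySem.Dict Int (PySem.Set Int)) (keys : List Int) :
    PySem.Dict Int (PySem.Set Int) :=
  keys.foldl (fun d k =>
    d.insert k ((T.getD k PySem.Set.empty).foldl
      (fun cl m => PySem.Set.union cl (T.getD m PySem.Set.empty))
      (T.getD k PySem.Set.empty))) PySem.Dict.empty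

def pvDIter (g : PySem.Dict Int (List Int)) (keys : List Int) :
    Nat → PySem.Dict Int (PySem.Set Int)
  | 0 => keys.foldl (fun d k => d.insert k (PySem.Set.ofList (pvSucc g k))) PySem.Dict.empty
  | p+1 => pvDStep (pvDIter g keys p) keys

def pvP2 (graph : List (Int × List Int)) : Nat := Nat.log2 (pvFuel graph) + 1

def pvClosTab (graph : List (Int × List Int)) : PySem.Dict Int (PySem.Set Int) :=
  pvDIter (PySem.Dict.ofList graph) (PySem.Dict.ofList graph).keys (pvP2 graph)

-- Pre_ excludes exactly the cyclic graphs (some node reaches itself): there Python A's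
-- unbounded recursion raises RecursionError, so A returns no value.
def Pre_compute_dependencies_length_old (graph : List (Int × List Int)) : Prop :=
  ∀ n ∈ graph.map (fun p => p.1), n ∉ (pvClosTab graph).getD n PySem.Set.empty
instance (graph : List (Int × List Int)) : Decidable (Pre_compute_dependencies_length_old graph) := by
  unfold Pre_compute_dependencies_length_old; infer_instance

def pvWitness_compute_dependencies_length_old : List (Int × List Int) := [(1, [2]), (2, [])]

def Spec_compute_dependencies_length_old (graph : List (Int × List Int)) (out : List (Int × Int)) : Prop := out = compute_dependencies_length_old_alt graph
instance (graph : List (Int × List Int)) (out : List (Int × Int)) : Decidable (Spec_compute_dependencies_length_old graph out) := by unfold Spec_compute_dependencies_length_old; infer_instance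

-- ===== CLAIM (what is proved, stated in full; the proofs are below) =====
def Claim_equal_compute_dependencies_length_old : Prop := ∀ (graph : List (Int × List Int)), Dom_compute_dependencies_length_old graph → Pre_compute_dependencies_length_old graph → Spec_compute_dependencies_length_old graph (compute_dependencies_length_old graph)


-- ===== LEMMAS AND PROOFS =====

-- pvC g f n = the set of nodes reachable from n by a path of 1..f edges; pvCC = saturated
def pvC (g : PySem.Dict Int (List Int)) : Nat → Int → PySem.Set Int
  | 0, _ => []
  | f+1, n => (pvSucc g n).foldl
      (fun cl nb => PySem.Set.union (PySem.Set.add cl nb) (pvC g f nb)) []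

def pvCC (graph : List (Int × List Int)) (n : Int) : PySem.Set Int :=
  pvC (PySem.Dict.ofList graph) (pvFuel graph) n

-- generic facts about the two fold shapes over sets

theorem pv_mem_foldl_union_add (F : Int → PySem.Set Int) :
    ∀ (l : List Int) (acc : PySem.Set Int) (x : Int),
      (x ∈ l.foldl (fun cl nb => PySem.Set.union (PySem.Set.add cl nb) (F nb)) acc) ↔
        (x ∈ acc ∨ ∃ nb ∈ l, x = nb ∨ x ∈ F nb) := by
  intro l
  induction l with
  | nil => simp
  | cons a l ih =>
    intro acc x
    rw [List.foldl_cons, ih]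
    simp only [PySem.Set.mem_union, PySem.Set.mem_add, List.mem_cons]
    aesop

theorem pv_nodup_foldl_union_add (F : Int → PySem.Set Int) :
    ∀ (l : List Int) (acc : PySem.Set Int), acc.Nodup →
      (l.foldl (fun cl nb => PySem.Set.union (PySem.Set.add cl nb) (F nb)) acc).Nodup := by
  intro l
  induction l with
  | nil => intro acc h; simpa using h
  | cons a l ih =>
    intro acc h
    rw [List.foldl_cons]
    exact ih _ (PySem.Set.nodup_union _ _ (PySem.Set.nodup_add _ _ h))

theorem pv_mem_foldl_union (F : Int → PySem.Set Int) :
    ∀ (l : List Int) (acc : PySem.Set Int) (x : Int),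
      (x ∈ l.foldl (fun t m => PySem.Set.union t (F m)) acc) ↔
        (x ∈ acc ∨ ∃ m ∈ l, x ∈ F m) := by
  intro l
  induction l with
  | nil => simp
  | cons a l ih =>
    intro acc x
    rw [List.foldl_cons, ih]
    simp [PySem.Set.mem_union]
    tauto

theorem pv_nodup_foldl_union (F : Int → PySem.Set Int) :
    ∀ (l : List Int) (acc : PySem.Set Int), acc.Nodup →
      (l.foldl (fun t m => PySem.Set.union t (F m)) acc).Nodup := by
  intro l
  induction l with
  | nil => intro acc h; simpa using h
  | cons a l ih =>
    intro acc h
    rw [List.foldl_cons]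
    exact ih _ (PySem.Set.nodup_union _ _ h)

theorem pv_foldl_union_append (F : Int → PySem.Set Int) :
    ∀ (l : List Int) (s : PySem.Set Int),
      ∃ r, l.foldl (fun t m => PySem.Set.union t (F m)) s = s ++ r := by
  intro l
  induction l with
  | nil => intro s; exact ⟨[], by simp⟩
  | cons a l ih =>
    intro s
    rw [List.foldl_cons]
    obtain ⟨r, hr⟩ := ih (PySem.Set.union s (F a))
    rw [hr, PySem.Set.union, PySem.Set.update_eq_append_filter]
    exact ⟨_, List.append_assoc _ _ _⟩

theorem pv_foldl_or (f : (Int × PySem.Set Int) → Bool) :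
    ∀ (l : List (Int × PySem.Set Int)) (b : Bool),
      l.foldl (fun b x => b || f x) b = (b || l.any f) := by
  intro l
  induction l with
  | nil => simp
  | cons a l ih => intro b; rw [List.foldl_cons, ih]; simp [Bool.or_assoc]

theorem pv_sum_lt_sum_of_mem {α : Type} (l : List α) (F G : α → Nat)
    (hle : ∀ a ∈ l, F a ≤ G a) {a₀ : α} (ha : a₀ ∈ l) (hlt : F a₀ < G a₀) :
    (l.map F).sum < (l.map G).sum := by
  induction l with
  | nil => cases ha
  | cons b l ih =>
    rcases List.mem_cons.1 ha with h | h
    · subst h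
      have h2 : ((l.map F).sum ≤ (l.map G).sum) :=
        List.sum_le_sum (fun i hi => hle i (List.mem_cons_of_mem _ hi))
      simpa using Nat.add_lt_add_of_lt_of_le hlt h2
    · have h1 : F b ≤ G b := hle b List.mem_cons_self
      have h2 := ih (fun a h' => hle a (List.mem_cons_of_mem _ h')) h
      simpa using Nat.add_lt_add_of_le_of_lt h1 h2

theorem pv_length_lt_of_ssub {s t : List Int} (hs : s.Nodup) (_ht : t.Nodup)
    (hsub : ∀ x ∈ s, x ∈ t) {x : Int} (hx : x ∈ t) (hnx : x ∉ s) :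
    s.length < t.length := by
  have hnd : (x :: s).Nodup := List.nodup_cons.2 ⟨hnx, hs⟩
  have hsp : (x :: s).Subperm t := hnd.subperm (List.cons_subset.2 ⟨hx, hsub⟩)
  have := hsp.length_le
  simpa [Nat.succ_le_iff] using this

theorem pv_length_eq_of_mem_iff {s t : List Int} (hs : s.Nodup) (ht : t.Nodup)
    (h : ∀ x, x ∈ s ↔ x ∈ t) : s.length = t.length :=
  ((List.perm_ext_iff_of_nodup hs ht).2 h).length_eq

-- basic pvC theory

theorem pv_mem_pvC_succ (g : PySem.Dict Int (List Int)) (f : Nat) (n x : Int) :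
    x ∈ pvC g (f+1) n ↔ ∃ nb ∈ pvSucc g n, x = nb ∨ x ∈ pvC g f nb := by
  show x ∈ (pvSucc g n).foldl _ [] ↔ _
  rw [pv_mem_foldl_union_add]
  simp

theorem pv_nodup_pvC (g : PySem.Dict Int (List Int)) (f : Nat) (n : Int) :
    (pvC g f n).Nodup := by
  cases f with
  | zero => exact List.nodup_nil
  | succ f => exact pv_nodup_foldl_union_add _ _ _ List.nodup_nil

theorem pvC_mono (g : PySem.Dict Int (List Int)) :
    ∀ (f : Nat) (n x : Int), x ∈ pvC g f n → x ∈ pvC g (f+1) n := by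
  intro f
  induction f with
  | zero => intro n x h; cases h
  | succ f ih =>
    intro n x h
    rw [pv_mem_pvC_succ] at h ⊢
    obtain ⟨nb, h1, h2⟩ := h
    exact ⟨nb, h1, h2.imp id (ih nb x)⟩

theorem pvC_mono_le (g : PySem.Dict Int (List Int)) {f f' : Nat} (h : f ≤ f') :
    ∀ (n x : Int), x ∈ pvC g f n → x ∈ pvC g f' n := by
  induction f', h using Nat.le_induction with
  | base => exact fun _ _ h => h
  | succ f' _ ih => exact fun n x hx => pvC_mono g f' n x (ih n x hx)

theorem pv_succ_of_not_mem_keys (g : PySem.Dict Int (List Int)) {n : Int}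
    (h : n ∉ g.keys) : pvSucc g n = [] := by
  have hc : g.contains n = false := by
    rcases Bool.eq_false_or_eq_true (g.contains n) with h' | h'
    · exact absurd ((PySem.Dict.contains_iff_mem_keys g n).1 h') h
    · exact h'
  have h2 : g.get? n = none := (PySem.Dict.get?_eq_none_iff_contains g n).2 hc
  simp [pvSucc, PySem.Dict.getD_eq_get?_getD, h2]

theorem pvC_of_not_mem_keys (g : PySem.Dict Int (List Int)) {n : Int}
    (h : n ∉ g.keys) : ∀ f, pvC g f n = [] := by
  intro f
  cases f with
  | zero => rfl
  | succ f =>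
    show (pvSucc g n).foldl _ [] = []
    rw [pv_succ_of_not_mem_keys g h]
    rfl

theorem pv_mem_keys_of_mem_pvC (g : PySem.Dict Int (List Int)) {f : Nat} {n x : Int}
    (h : x ∈ pvC g f n) : n ∈ g.keys := by
  by_contra hn
  rw [pvC_of_not_mem_keys g hn] at h
  cases h

-- every closure element is one of the input's neighbour entries

def pvRawNbrs (graph : List (Int × List Int)) : List Int := (graph.map (fun p => p.2)).flatten

theorem pv_values_update_subset {ν : Type} :
    ∀ (l : List (Int × ν)) (d : PySem.Dict Int ν) (v : ν),
      v ∈ (d.update l).values → v ∈ d.values ∨ v ∈ l.map (fun p => p.2) := by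
  intro l
  induction l with
  | nil => intro d v h; exact Or.inl h
  | cons a l ih =>
    intro d v h
    rw [PySem.Dict.update, List.foldl_cons] at h
    rcases ih _ v h with h' | h'
    · rcases PySem.Dict.mem_values_insert d a.1 a.2 v h' with h'' | h''
      · exact Or.inr (by simp [h''])
      · exact Or.inl h''
    · exact Or.inr (List.mem_cons_of_mem _ h')

theorem pv_succ_subset_raw (graph : List (Int × List Int)) (n x : Int)
    (h : x ∈ pvSucc (PySem.Dict.ofList graph) n) : x ∈ pvRawNbrs graph := by
  set g := PySem.Dict.ofList graph with hg
  unfold pvSucc at h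
  rw [PySem.Dict.getD_eq_get?_getD] at h
  cases hq : g.get? n with
  | none => rw [hq] at h; cases h
  | some v =>
    rw [hq] at h
    have hv : (n, v) ∈ g.items := PySem.Dict.mem_items_of_get?_eq_some g hq
    have hvv : v ∈ g.values := by
      unfold PySem.Dict.values
      exact List.mem_map.2 ⟨(n, v), hv, rfl⟩
    have : v ∈ (PySem.Dict.empty (κ := Int) (ν := List Int)).values ∨
        v ∈ graph.map (fun p => p.2) := pv_values_update_subset graph _ v hvv
    rcases this with h' | h'
    · cases h'
    · exact List.mem_flatten.2 ⟨v, h', h⟩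

theorem pvC_subset_raw (graph : List (Int × List Int)) :
    ∀ (f : Nat) (n x : Int), x ∈ pvC (PySem.Dict.ofList graph) f n → x ∈ pvRawNbrs graph := by
  intro f
  induction f with
  | zero => intro n x h; cases h
  | succ f ih =>
    intro n x h
    rw [pv_mem_pvC_succ] at h
    obtain ⟨nb, h1, h2⟩ := h
    rcases h2 with h2 | h2
    · subst h2; exact pv_succ_subset_raw graph n x h1
    · exact ih nb x h2

def pvUniv (graph : List (Int × List Int)) : PySem.Set Int := PySem.Set.ofList (pvRawNbrs graph)

theorem pv_rawNbrs_len (graph : List (Int × List Int)) :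
    (pvRawNbrs graph).length = pvSumLens graph := by
  unfold pvRawNbrs pvSumLens
  rw [List.length_flatten, List.map_map]
  rfl

theorem pvC_card_le (graph : List (Int × List Int)) (f : Nat) (n : Int) :
    (pvC (PySem.Dict.ofList graph) f n).length ≤ pvSumLens graph := by
  have h1 : (pvC (PySem.Dict.ofList graph) f n).length ≤ (pvUniv graph).length := by
    refine List.Subperm.length_le ((pv_nodup_pvC _ f n).subperm ?_)
    intro x hx
    exact (PySem.Set.mem_ofList _ x).2 (pvC_subset_raw graph f n x hx)
  have h2 := PySem.Set.length_ofList_le (pvRawNbrs graph)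
  rw [pv_rawNbrs_len] at h2
  exact le_trans h1 h2

-- saturation: pvC reaches a fixpoint within keys·nbrs steps

def pvPF (g : PySem.Dict Int (List Int)) (f : Nat) : Prop :=
  ∀ n x, x ∈ pvC g (f+1) n ↔ x ∈ pvC g f n

theorem pvPF_succ {g : PySem.Dict Int (List Int)} {f : Nat} (h : pvPF g f) : pvPF g (f+1) := by
  intro n x
  rw [pv_mem_pvC_succ, pv_mem_pvC_succ]
  constructor
  · rintro ⟨nb, h1, h2⟩; exact ⟨nb, h1, h2.imp id fun hh => (h nb x).1 hh⟩
  · rintro ⟨nb, h1, h2⟩; exact ⟨nb, h1, h2.imp id fun hh => (h nb x).2 hh⟩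

theorem pvPF_ge {g : PySem.Dict Int (List Int)} {f : Nat} (h : pvPF g f) :
    ∀ f', f ≤ f' → pvPF g f' := by
  intro f' hle
  induction f', hle using Nat.le_induction with
  | base => exact h
  | succ f' _ ih => exact pvPF_succ ih

theorem pvC_eq_of_PF {g : PySem.Dict Int (List Int)} {f : Nat} (h : pvPF g f) :
    ∀ f', f ≤ f' → ∀ n x, (x ∈ pvC g f' n ↔ x ∈ pvC g f n) := by
  intro f' hle
  induction f', hle using Nat.le_induction with
  | base => exact fun n x => Iff.rfl
  | succ f' hle ih =>
    intro n x
    rw [← ih n x]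
    exact pvPF_ge h f' hle n x

def pvSm (g : PySem.Dict Int (List Int)) (f : Nat) : Nat :=
  (g.keys.map (fun k => (pvC g f k).length)).sum

theorem pv_not_PF_lt {g : PySem.Dict Int (List Int)} {f : Nat} (h : ¬ pvPF g f) :
    pvSm g f < pvSm g (f+1) := by
  unfold pvPF at h
  push_neg at h
  obtain ⟨n, x, hx⟩ := h
  have hmono := pvC_mono g f n x
  have hin : x ∈ pvC g (f+1) n ∧ x ∉ pvC g f n := by tauto
  have hk : n ∈ g.keys := pv_mem_keys_of_mem_pvC g hin.1
  refine pv_sum_lt_sum_of_mem g.keys _ _ ?_ hk ?_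
  · intro k _
    exact List.Subperm.length_le ((pv_nodup_pvC g f k).subperm (fun y hy => pvC_mono g f k y hy))
  · exact pv_length_lt_of_ssub (pv_nodup_pvC g f n) (pv_nodup_pvC g (f+1) n)
      (fun y hy => pvC_mono g f n y hy) hin.1 hin.2

theorem pvSm_le (graph : List (Int × List Int)) (f : Nat) :
    pvSm (PySem.Dict.ofList graph) f ≤
      (PySem.Dict.ofList graph).keys.length * pvSumLens graph := by
  unfold pvSm
  have := List.sum_le_card_nsmul
    ((PySem.Dict.ofList graph).keys.map (fun k => (pvC (PySem.Dict.ofList graph) f k).length))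
    (pvSumLens graph)
    (by
      intro y hy
      rcases List.mem_map.1 hy with ⟨k, _, hk⟩
      rw [← hk]
      exact pvC_card_le graph f k)
  simpa [List.length_map, smul_eq_mul] using this

theorem pvPF_exists (graph : List (Int × List Int)) :
    ∀ f, (PySem.Dict.ofList graph).keys.length * pvSumLens graph ≤ f →
      pvPF (PySem.Dict.ofList graph) f := by
  set g := PySem.Dict.ofList graph with hg
  set N := g.keys.length * pvSumLens graph with hN
  have hex : ∃ f₀ ≤ N, pvPF g f₀ := by
    by_contra hc
    push_neg at hc
    have hstep : ∀ j, j ≤ N + 1 → j ≤ pvSm g j := by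
      intro j
      induction j with
      | zero => intro _; exact Nat.zero_le _
      | succ j ih =>
        intro hj
        have h1 : j ≤ pvSm g j := ih (by omega)
        have h2 : pvSm g j < pvSm g (j+1) := pv_not_PF_lt (hc j (by omega))
        omega
    have := hstep (N+1) le_rfl
    have hle := pvSm_le graph (N+1)
    rw [← hg] at hle
    omega
  obtain ⟨f₀, hf₀, hpf⟩ := hex
  intro f hf
  exact pvPF_ge hpf f (le_trans hf₀ hf)

theorem pv_keys_ofList (graph : List (Int × List Int)) :
    (PySem.Dict.ofList graph).keys = PySem.Set.ofList (graph.map (fun p => p.1)) := by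
  have : PySem.Dict.ofList graph =
      List.foldl (fun (d : PySem.Dict Int (List Int)) x =>
        d.insert ((fun (p : Int × List Int) => p.1) x)
          ((fun (_ : PySem.Dict Int (List Int)) (p : Int × List Int) => p.2) d x))
        PySem.Dict.empty graph := rfl
  rw [this, PySem.Dict.keys_foldl_insert_key]
  show PySem.Set.update [] _ = _
  rw [PySem.Set.update_nil_left]

theorem pv_keys_len_le (graph : List (Int × List Int)) :
    (PySem.Dict.ofList graph).keys.length ≤ graph.length := by
  rw [pv_keys_ofList]
  have := PySem.Set.length_ofList_le (graph.map (fun p => p.1))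
  simpa using this

theorem pvPF_fuel (graph : List (Int × List Int)) :
    pvPF (PySem.Dict.ofList graph) (graph.length * pvSumLens graph + pvSumLens graph) := by
  apply pvPF_exists
  have := pv_keys_len_le graph
  have := Nat.mul_le_mul_right (pvSumLens graph) (pv_keys_len_le graph)
  omega

theorem pv_mem_pvCC_iff (graph : List (Int × List Int)) (n x : Int) :
    x ∈ pvCC graph n ↔
      ∃ nb ∈ pvSucc (PySem.Dict.ofList graph) n, x = nb ∨ x ∈ pvCC graph nb := by
  set g := PySem.Dict.ofList graph with hg
  set w := graph.length * pvSumLens graph + pvSumLens graph with hw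
  have hPF : pvPF g w := pvPF_fuel graph
  have h1 : pvCC graph n = pvC g (w+1) n := rfl
  rw [h1, pv_mem_pvC_succ]
  constructor
  · rintro ⟨nb, ha, hb⟩
    refine ⟨nb, ha, hb.imp id fun hh => ?_⟩
    show x ∈ pvC g (w+1) nb
    exact (hPF nb x).2 hh
  · rintro ⟨nb, ha, hb⟩
    refine ⟨nb, ha, hb.imp id fun hh => ?_⟩
    exact (hPF nb x).1 hh

theorem pvC_add (g : PySem.Dict Int (List Int)) :
    ∀ (f f' : Nat) (a x y : Int), x ∈ pvC g f a → y ∈ pvC g f' x → y ∈ pvC g (f+f') a := by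
  intro f
  induction f with
  | zero => intro f' a x y hx; cases hx
  | succ f ih =>
    intro f' a x y hx hy
    rw [pv_mem_pvC_succ] at hx
    obtain ⟨nb, h1, h2⟩ := hx
    have : (f+1) + f' = (f + f') + 1 := by omega
    rw [this, pv_mem_pvC_succ]
    rcases h2 with h2 | h2
    · subst h2
      exact ⟨x, h1, Or.inr (pvC_mono_le g (by omega) x y hy)⟩
    · exact ⟨nb, h1, Or.inr (ih f' nb x y h2 hy)⟩

theorem pvCC_trans (graph : List (Int × List Int)) {n m x : Int}
    (h1 : m ∈ pvCC graph n) (h2 : x ∈ pvCC graph m) : x ∈ pvCC graph n := by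
  set g := PySem.Dict.ofList graph with hg
  set w := graph.length * pvSumLens graph + pvSumLens graph with hw
  have hPF : pvPF g w := pvPF_fuel graph
  have hadd : x ∈ pvC g ((w+1) + (w+1)) n := pvC_add g (w+1) (w+1) n m x h1 h2
  have e1 := pvC_eq_of_PF hPF ((w+1)+(w+1)) (by omega) n x
  have e2 := pvC_eq_of_PF hPF (w+1) (by omega) n x
  show x ∈ pvC g (w+1) n
  rw [e2, ← e1]
  exact hadd

-- the doubling closure table has exactly the members of pvCC

theorem pv_getD_foldl_insert (F : Int → PySem.Set Int) :
    ∀ (l : List Int) (d : PySem.Dict Int (PySem.Set Int)) (n : Int),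
      (l.foldl (fun d k => d.insert k (F k)) d).getD n PySem.Set.empty
        = if n ∈ l then F n else d.getD n PySem.Set.empty := by
  intro l
  induction l with
  | nil => intro d n; simp
  | cons a l ih =>
    intro d n
    rw [List.foldl_cons, ih]
    by_cases hn : n ∈ l
    · simp [hn]
    · rw [PySem.Dict.getD_insert]
      by_cases hna : n = a
      · simp [hn, hna]
      · simp [hn, hna]

theorem pvC_comp (g : PySem.Dict Int (List Int)) :
    ∀ (f f' : Nat) (a x : Int), 1 ≤ f →
      (x ∈ pvC g (f+f') a ↔ (x ∈ pvC g f a ∨ ∃ m ∈ pvC g f a, x ∈ pvC g f' m)) := by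
  intro f
  induction f with
  | zero => intro _ _ _ h; omega
  | succ f ih =>
    intro f' a x _
    by_cases hf : f = 0
    · subst hf
      have e : 1 + f' = f' + 1 := by omega
      rw [e, pv_mem_pvC_succ]
      have h1 : ∀ y : Int, y ∈ pvC g 1 a ↔ ∃ nb ∈ pvSucc g a, y = nb := by
        intro y
        rw [show (1 : Nat) = 0 + 1 from rfl, pv_mem_pvC_succ]
        simp [pvC]
      constructor
      · rintro ⟨nb, hnb, hx | hx⟩
        · exact Or.inl ((h1 x).2 ⟨nb, hnb, hx⟩)
        · exact Or.inr ⟨nb, (h1 nb).2 ⟨nb, hnb, rfl⟩, hx⟩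
      · rintro (hx | ⟨m, hm, hx⟩)
        · obtain ⟨nb, hnb, he⟩ := (h1 x).1 hx
          exact ⟨nb, hnb, Or.inl he⟩
        · obtain ⟨nb, hnb, he⟩ := (h1 m).1 hm
          exact ⟨nb, hnb, Or.inr (he ▸ hx)⟩
    · have hf1 : 1 ≤ f := by omega
      have e : (f+1) + f' = (f + f') + 1 := by omega
      rw [e, pv_mem_pvC_succ]
      constructor
      · rintro ⟨nb, hnb, hx | hx⟩
        · exact Or.inl ((pv_mem_pvC_succ g f a x).2 ⟨nb, hnb, Or.inl hx⟩)
        · rw [ih f' nb x hf1] at hx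
          rcases hx with hx | ⟨m, hm, hx⟩
          · exact Or.inl ((pv_mem_pvC_succ g f a x).2 ⟨nb, hnb, Or.inr hx⟩)
          · exact Or.inr ⟨m, (pv_mem_pvC_succ g f a m).2 ⟨nb, hnb, Or.inr hm⟩, hx⟩
      · rintro (hx | ⟨m, hm, hx⟩)
        · rw [pv_mem_pvC_succ] at hx
          obtain ⟨nb, hnb, h2⟩ := hx
          refine ⟨nb, hnb, ?_⟩
          rcases h2 with h2 | h2
          · exact Or.inl h2
          · exact Or.inr (pvC_mono_le g (by omega) nb x h2)
        · rw [pv_mem_pvC_succ] at hm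
          obtain ⟨nb, hnb, h2⟩ := hm
          refine ⟨nb, hnb, Or.inr ?_⟩
          rcases h2 with h2 | h2
          · subst h2
            exact pvC_mono_le g (by omega) m x hx
          · rw [ih f' nb x hf1]
            exact Or.inr ⟨m, h2, hx⟩

theorem pv_DIter_mem (graph : List (Int × List Int)) :
    ∀ (p : Nat) (n x : Int),
      x ∈ (pvDIter (PySem.Dict.ofList graph) (PySem.Dict.ofList graph).keys p).getD n
        PySem.Set.empty
      ↔ x ∈ pvC (PySem.Dict.ofList graph) (2^p) n := by
  intro p
  induction p with
  | zero =>
    intro n x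
    show x ∈ ((PySem.Dict.ofList graph).keys.foldl
      (fun d k => d.insert k (PySem.Set.ofList (pvSucc (PySem.Dict.ofList graph) k)))
      PySem.Dict.empty).getD n PySem.Set.empty ↔ _
    rw [pv_getD_foldl_insert (fun k => PySem.Set.ofList (pvSucc (PySem.Dict.ofList graph) k))]
    have h1 : ∀ y : Int, y ∈ pvC (PySem.Dict.ofList graph) (2^0) n ↔
        y ∈ pvSucc (PySem.Dict.ofList graph) n := by
      intro y
      rw [show (2:Nat)^0 = 0 + 1 from rfl, pv_mem_pvC_succ]
      simp [pvC]
    by_cases hn : n ∈ (PySem.Dict.ofList graph).keys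
    · rw [if_pos hn, PySem.Set.mem_ofList, h1]
    · rw [if_neg hn, h1]
      constructor
      · intro h; cases h
      · intro h
        rw [pv_succ_of_not_mem_keys _ hn] at h
        cases h
  | succ p ih =>
    intro n x
    show x ∈ (pvDStep (pvDIter (PySem.Dict.ofList graph) (PySem.Dict.ofList graph).keys p)
      (PySem.Dict.ofList graph).keys).getD n PySem.Set.empty ↔ _
    set T := pvDIter (PySem.Dict.ofList graph) (PySem.Dict.ofList graph).keys p with hT
    unfold pvDStep
    rw [pv_getD_foldl_insert (fun k => (T.getD k PySem.Set.empty).foldl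
      (fun cl m => PySem.Set.union cl (T.getD m PySem.Set.empty)) (T.getD k PySem.Set.empty))]
    have hcomp := pvC_comp (PySem.Dict.ofList graph) (2^p) (2^p) n x
      (Nat.one_le_two_pow)
    have e : (2:Nat)^(p+1) = 2^p + 2^p := by
      rw [pow_succ]
      omega
    by_cases hn : n ∈ (PySem.Dict.ofList graph).keys
    · rw [if_pos hn, pv_mem_foldl_union (fun m => T.getD m PySem.Set.empty), e, hcomp]
      constructor
      · rintro (h | ⟨m, hm, h⟩)
        · exact Or.inl ((ih n x).1 h)
        · exact Or.inr ⟨m, (ih n m).1 hm, (ih m x).1 h⟩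
      · rintro (h | ⟨m, hm, h⟩)
        · exact Or.inl ((ih n x).2 h)
        · exact Or.inr ⟨m, (ih n m).2 hm, (ih m x).2 h⟩
    · rw [if_neg hn]
      rw [pvC_of_not_mem_keys _ hn]
      constructor
      · intro h; cases h
      · intro h; cases h

theorem pv_clos_mem (graph : List (Int × List Int)) (n x : Int) :
    x ∈ (pvClosTab graph).getD n PySem.Set.empty ↔ x ∈ pvCC graph n := by
  unfold pvClosTab
  rw [pv_DIter_mem]
  have hPF := pvPF_fuel graph
  have h2 : graph.length * pvSumLens graph + pvSumLens graph ≤ 2 ^ pvP2 graph := by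
    have h := Nat.lt_log2_self (n := pvFuel graph)
    unfold pvP2
    unfold pvFuel at h ⊢
    omega
  rw [pvC_eq_of_PF hPF (2 ^ pvP2 graph) h2 n x]
  exact (hPF n x).symm

theorem pv_pre_not_self {graph : List (Int × List Int)}
    (hpre : Pre_compute_dependencies_length_old graph) : ∀ n, n ∉ pvCC graph n := by
  intro n hn
  by_cases hk : n ∈ (PySem.Dict.ofList graph).keys
  · rw [pv_keys_ofList] at hk
    exact hpre n ((PySem.Set.mem_ofList _ n).1 hk) ((pv_clos_mem graph n n).2 hn)
  · rw [show pvCC graph n = pvC (PySem.Dict.ofList graph) (pvFuel graph) n from rfl,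
      pvC_of_not_mem_keys _ hk] at hn
    cases hn

theorem pvCC_card_lt (graph : List (Int × List Int))
    (hpre : Pre_compute_dependencies_length_old graph) {n nb : Int}
    (hnb : nb ∈ pvSucc (PySem.Dict.ofList graph) n) :
    (pvCC graph nb).length < (pvCC graph n).length := by
  refine pv_length_lt_of_ssub (pv_nodup_pvC _ _ _) (pv_nodup_pvC _ _ _)
    (fun x hx => (pv_mem_pvCC_iff graph n x).2 ⟨nb, hnb, Or.inr hx⟩)
    ((pv_mem_pvCC_iff graph n nb).2 ⟨nb, hnb, Or.inl rfl⟩)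
    (pv_pre_not_self hpre nb)

-- A-side: the memoized dfs returns (a set with) exactly the reachable nodes

def pvInvA (graph : List (Int × List Int)) (memo : PySem.Dict Int (PySem.Set Int)) : Prop :=
  ∀ k s, memo.get? k = some s → s.Nodup ∧ ∀ x, x ∈ s ↔ x ∈ pvCC graph k

theorem pv_dfsA_ok (graph : List (Int × List Int))
    (hpre : Pre_compute_dependencies_length_old graph) :
    ∀ (fuel : Nat) (memo : PySem.Dict Int (PySem.Set Int)) (n : Int),
      pvInvA graph memo → (pvCC graph n).length < fuel →
      pvInvA graph (pvDfsA (PySem.Dict.ofList graph) fuel memo n).1 ∧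
      (pvDfsA (PySem.Dict.ofList graph) fuel memo n).2.Nodup ∧
      (∀ x, x ∈ (pvDfsA (PySem.Dict.ofList graph) fuel memo n).2 ↔ x ∈ pvCC graph n) := by
  intro fuel
  induction fuel with
  | zero => intro memo n _ h; omega
  | succ fuel ih =>
    intro memo n hinv hcard
    have hfold : ∀ (l : List Int), (∀ nb ∈ l, nb ∈ pvSucc (PySem.Dict.ofList graph) n) →
        ∀ (memo : PySem.Dict Int (PySem.Set Int)) (acc : PySem.Set Int),
          pvInvA graph memo → acc.Nodup →
          pvInvA graph ((l.foldl
            (fun (p : PySem.Dict Int (PySem.Set Int) × PySem.Set Int) nb =>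
              ((pvDfsA (PySem.Dict.ofList graph) fuel p.1 nb).1,
               PySem.Set.union (PySem.Set.add p.2 nb) (pvDfsA (PySem.Dict.ofList graph) fuel p.1 nb).2)) (memo, acc)).1) ∧
          ((l.foldl
            (fun (p : PySem.Dict Int (PySem.Set Int) × PySem.Set Int) nb =>
              ((pvDfsA (PySem.Dict.ofList graph) fuel p.1 nb).1,
               PySem.Set.union (PySem.Set.add p.2 nb) (pvDfsA (PySem.Dict.ofList graph) fuel p.1 nb).2)) (memo, acc)).2).Nodup ∧
          (∀ x, x ∈ ((l.foldl
            (fun (p : PySem.Dict Int (PySem.Set Int) × PySem.Set Int) nb =>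
              ((pvDfsA (PySem.Dict.ofList graph) fuel p.1 nb).1,
               PySem.Set.union (PySem.Set.add p.2 nb) (pvDfsA (PySem.Dict.ofList graph) fuel p.1 nb).2)) (memo, acc)).2) ↔
            (x ∈ acc ∨ ∃ nb ∈ l, x = nb ∨ x ∈ pvCC graph nb)) := by
      intro l
      induction l with
      | nil => intro _ memo acc hinv hnd; exact ⟨hinv, hnd, by simp⟩
      | cons a l ihl =>
        intro hl memo acc hinv hnd
        have hmema : a ∈ pvSucc (PySem.Dict.ofList graph) n := hl a List.mem_cons_self
        have hca : (pvCC graph a).length < fuel := by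
          have h1 := pvCC_card_lt graph hpre hmema
          omega
        have hq := ih memo a hinv hca
        rw [List.foldl_cons]
        have h3 := ihl (fun nb hnb => hl nb (List.mem_cons_of_mem _ hnb))
          (pvDfsA (PySem.Dict.ofList graph) fuel memo a).1
          (PySem.Set.union (PySem.Set.add acc a) (pvDfsA (PySem.Dict.ofList graph) fuel memo a).2)
          hq.1
          (PySem.Set.nodup_union _ _ (PySem.Set.nodup_add _ _ hnd))
        refine ⟨h3.1, h3.2.1, ?_⟩
        intro x
        rw [h3.2.2 x, PySem.Set.mem_union, PySem.Set.mem_add, hq.2.2 x]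
        simp only [List.mem_cons]
        aesop
    cases hm : memo.get? n with
    | some s =>
      have h := hinv n s hm
      simp only [pvDfsA, hm]
      exact ⟨hinv, h.1, h.2⟩
    | none =>
      have h3 := hfold ((PySem.Dict.ofList graph).getD n []) (fun _ h => h) memo
        PySem.Set.empty hinv List.nodup_nil
      simp only [pvDfsA, hm]
      refine ⟨?_, h3.2.1, ?_⟩
      · intro k s hk
        rw [PySem.Dict.get?_insert] at hk
        split at hk
        · rename_i hkn
          cases hk
          subst hkn
          refine ⟨h3.2.1, fun x => ?_⟩
          rw [h3.2.2 x, pv_mem_pvCC_iff graph k x]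
          simp [PySem.Set.empty, pvSucc]
        · exact h3.1 k s hk
      · intro x
        rw [h3.2.2 x, pv_mem_pvCC_iff graph n x]
        simp [PySem.Set.empty, pvSucc]

theorem pv_topA (graph : List (Int × List Int))
    (hpre : Pre_compute_dependencies_length_old graph) :
    ∀ (l : List Int) (memo : PySem.Dict Int (PySem.Set Int)) (dl : PySem.Dict Int Int),
      pvInvA graph memo → l.Nodup → (∀ k ∈ l, dl.contains k = false) →
      ((l.foldl (fun (p : PySem.Dict Int (PySem.Set Int) × PySem.Dict Int Int) node =>
          ((pvDfsA (PySem.Dict.ofList graph) (pvSumLens graph + 1) p.1 node).1,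
           p.2.insert node (PySem.Set.len
             (pvDfsA (PySem.Dict.ofList graph) (pvSumLens graph + 1) p.1 node).2)))
        (memo, dl)).2).items
      = dl.items ++ l.map (fun k => (k, ((pvCC graph k).length : Int))) := by
  intro l
  induction l with
  | nil => intro memo dl _ _ _; simp
  | cons a l ihl =>
    intro memo dl hinv hnd hdl
    have hca : (pvCC graph a).length < pvSumLens graph + 1 :=
      Nat.lt_succ_of_le (pvC_card_le graph (pvFuel graph) a)
    have hq := pv_dfsA_ok graph hpre (pvSumLens graph + 1) memo a hinv hca
    have hlen : PySem.Set.len (pvDfsA (PySem.Dict.ofList graph) (pvSumLens graph + 1) memo a).2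
        = ((pvCC graph a).length : Int) := by
      have h := pv_length_eq_of_mem_iff hq.2.1 (pv_nodup_pvC _ _ _) hq.2.2
      unfold PySem.Set.len
      exact congrArg _ h
    have hane : ∀ k ∈ l, k ≠ a := by
      intro k hk
      rcases List.nodup_cons.1 hnd with ⟨ha, _⟩
      intro he; exact ha (he ▸ hk)
    rw [List.foldl_cons]
    rw [ihl (pvDfsA (PySem.Dict.ofList graph) (pvSumLens graph + 1) memo a).1
      (dl.insert a (PySem.Set.len (pvDfsA (PySem.Dict.ofList graph) (pvSumLens graph + 1) memo a).2))
      hq.1 (List.nodup_cons.1 hnd).2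
      (by
        intro k hk
        rw [PySem.Dict.contains_insert]
        simp [hane k hk, hdl k (List.mem_cons_of_mem _ hk)])]
    rw [PySem.Dict.items_insert_of_not_contains dl _ (hdl a List.mem_cons_self), hlen]
    simp

theorem pv_A_eq (graph : List (Int × List Int))
    (hpre : Pre_compute_dependencies_length_old graph) :
    compute_dependencies_length_old graph =
      (PySem.Dict.ofList graph).keys.map (fun k => (k, ((pvCC graph k).length : Int))) := by
  have h0 : pvInvA graph PySem.Dict.empty := by
    intro k s hk
    rw [PySem.Dict.get?_empty] at hk
    cases hk
  have h := pv_topA graph hpre (PySem.Dict.ofList graph).keys PySem.Dict.empty PySem.Dict.empty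
    h0 (PySem.Dict.nodup_keys_ofList graph)
    (fun k _ => PySem.Dict.contains_empty k)
  show ((((PySem.Dict.ofList graph).keys.foldl
      (fun (p : PySem.Dict Int (PySem.Set Int) × PySem.Dict Int Int) node =>
        ((pvDfsA (PySem.Dict.ofList graph) (pvSumLens graph + 1) p.1 node).1,
         p.2.insert node (PySem.Set.len
           (pvDfsA (PySem.Dict.ofList graph) (pvSumLens graph + 1) p.1 node).2)))
      (PySem.Dict.empty, PySem.Dict.empty)).2).items) = _
  rw [h]
  rfl

-- B-side: the fixpoint loop stabilizes on exactly the reachable sets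

def pvTT (M : PySem.Dict Int (PySem.Set Int)) (kv : Int × PySem.Set Int) : PySem.Set Int :=
  kv.2.foldl (fun t m => PySem.Set.union t (M.getD m PySem.Set.empty)) (PySem.Set.ofList kv.2)

theorem pv_step_eq (M : PySem.Dict Int (PySem.Set Int)) : pvStep M =
    (M.items.foldl (fun (d : PySem.Dict Int (PySem.Set Int)) kv => d.insert kv.1 (pvTT M kv))
       PySem.Dict.empty,
     M.items.foldl (fun (b : Bool) kv =>
       b || !(PySem.Set.len (pvTT M kv) == PySem.Set.len kv.2)) false) := by
  unfold pvStep
  rw [PySem.List.foldl_prod_mk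
    (f := fun (d : PySem.Dict Int (PySem.Set Int)) (kv : Int × PySem.Set Int) =>
      d.insert kv.1 (kv.2.foldl (fun t m => PySem.Set.union t (M.getD m PySem.Set.empty))
        (PySem.Set.ofList kv.2)))
    (g := fun (b : Bool) (kv : Int × PySem.Set Int) =>
      b || !(PySem.Set.len (kv.2.foldl (fun t m => PySem.Set.union t (M.getD m PySem.Set.empty))
        (PySem.Set.ofList kv.2)) == PySem.Set.len kv.2))]
  rfl

theorem pv_mem_pvTT (M : PySem.Dict Int (PySem.Set Int)) (kv : Int × PySem.Set Int) (x : Int) :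
    x ∈ pvTT M kv ↔ x ∈ kv.2 ∨ ∃ m ∈ kv.2, x ∈ M.getD m PySem.Set.empty := by
  unfold pvTT
  rw [pv_mem_foldl_union (fun m => M.getD m PySem.Set.empty), PySem.Set.mem_ofList]

theorem pv_nodup_pvTT (M : PySem.Dict Int (PySem.Set Int)) (kv : Int × PySem.Set Int) :
    (pvTT M kv).Nodup :=
  pv_nodup_foldl_union _ _ _ (PySem.Set.nodup_ofList _)

theorem pv_pvTT_eq_self (M : PySem.Dict Int (PySem.Set Int)) (kv : Int × PySem.Set Int)
    (hnd : kv.2.Nodup) (hlen : (pvTT M kv).length = kv.2.length) : pvTT M kv = kv.2 := by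
  obtain ⟨r, hr⟩ := pv_foldl_union_append (fun m => M.getD m PySem.Set.empty) kv.2
    (PySem.Set.ofList kv.2)
  have hb : PySem.Set.ofList kv.2 = kv.2 := PySem.Set.ofList_eq_self_of_nodup _ hnd
  have he : pvTT M kv = PySem.Set.ofList kv.2 ++ r := hr
  rw [hb] at he
  rw [he] at hlen ⊢
  rw [List.length_append] at hlen
  have : r = [] := List.eq_nil_of_length_eq_zero (by omega)
  simp [this]

theorem pv_items_foldl_insert_map {β ν : Type} (F : Int × β → ν) :
    ∀ (l : List (Int × β)) (d : PySem.Dict Int ν),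
      (l.map (fun p => p.1)).Nodup → (∀ kv ∈ l, d.contains kv.1 = false) →
      (l.foldl (fun d kv => d.insert kv.1 (F kv)) d).items
        = d.items ++ l.map (fun kv => (kv.1, F kv)) := by
  intro l
  induction l with
  | nil => intro d _ _; simp
  | cons a l ih =>
    intro d hnd hdc
    have hnd2 : (a.1 :: l.map (fun p => p.1)).Nodup := by simpa using hnd
    have hnd' := List.nodup_cons.1 hnd2
    rw [List.foldl_cons, ih _ hnd'.2
      (by
        intro kv hkv
        rw [PySem.Dict.contains_insert]
        have : kv.1 ≠ a.1 := by
          intro he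
          exact hnd'.1 (he ▸ List.mem_map.2 ⟨kv, hkv, rfl⟩)
        simp [this, hdc kv (List.mem_cons_of_mem _ hkv)])]
    rw [PySem.Dict.items_insert_of_not_contains d _ (hdc a List.mem_cons_self)]
    simp

def pvInvB (graph : List (Int × List Int)) (M : PySem.Dict Int (PySem.Set Int)) : Prop :=
  M.keys = (PySem.Dict.ofList graph).keys ∧
  ∀ k s, M.get? k = some s → s.Nodup ∧
    (∀ x ∈ pvSucc (PySem.Dict.ofList graph) k, x ∈ s) ∧
    (∀ x ∈ s, x ∈ pvCC graph k)

theorem pv_step_items (M : PySem.Dict Int (PySem.Set Int)) (hnd : M.keys.Nodup) :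
    (pvStep M).1.items = M.items.map (fun kv => (kv.1, pvTT M kv)) := by
  rw [pv_step_eq]
  have h := pv_items_foldl_insert_map (pvTT M) M.items PySem.Dict.empty hnd
    (fun kv _ => PySem.Dict.contains_empty kv.1)
  simpa using h

theorem pv_step_keys (M : PySem.Dict Int (PySem.Set Int)) (hnd : M.keys.Nodup) :
    (pvStep M).1.keys = M.keys := by
  unfold PySem.Dict.keys
  rw [pv_step_items M hnd, List.map_map]
  rfl

theorem pv_step_flag (M : PySem.Dict Int (PySem.Set Int)) :
    (pvStep M).2 = M.items.any (fun kv =>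
      !(PySem.Set.len (pvTT M kv) == PySem.Set.len kv.2)) := by
  rw [pv_step_eq]
  have := pv_foldl_or (fun kv => !(PySem.Set.len (pvTT M kv) == PySem.Set.len kv.2)) M.items false
  simpa using this

theorem pv_len_eq_iff (s t : PySem.Set Int) :
    (PySem.Set.len s == PySem.Set.len t) = true ↔ s.length = t.length := by
  unfold PySem.Set.len
  simp

theorem pv_invB_step (graph : List (Int × List Int)) (M : PySem.Dict Int (PySem.Set Int))
    (hinv : pvInvB graph M) : pvInvB graph (pvStep M).1 := by
  have hkn : M.keys.Nodup := hinv.1 ▸ PySem.Dict.nodup_keys_ofList graph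
  refine ⟨by rw [pv_step_keys M hkn, hinv.1], ?_⟩
  intro k s hk
  have hmem := PySem.Dict.mem_items_of_get?_eq_some _ hk
  rw [pv_step_items M hkn] at hmem
  obtain ⟨kv, hkv, heq⟩ := List.mem_map.1 hmem
  have h1 : kv.1 = k := congrArg Prod.fst heq
  have h2 : pvTT M kv = s := congrArg Prod.snd heq
  have hMk : M.get? kv.1 = some kv.2 := PySem.Dict.get?_of_mem_items M hkv hkn
  have hp := hinv.2 kv.1 kv.2 hMk
  subst h1
  rw [← h2]
  refine ⟨pv_nodup_pvTT M kv, ?_, ?_⟩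
  · intro x hx
    exact (pv_mem_pvTT M kv x).2 (Or.inl (hp.2.1 x hx))
  · intro x hx
    rcases (pv_mem_pvTT M kv x).1 hx with hx' | ⟨m, hm, hx'⟩
    · exact hp.2.2 x hx'
    · have hmcc : m ∈ pvCC graph kv.1 := hp.2.2 m hm
      rw [PySem.Dict.getD_eq_get?_getD] at hx'
      cases hq : M.get? m with
      | none => rw [hq] at hx'; simp [PySem.Set.empty] at hx'
      | some s' =>
        rw [hq] at hx'
        simp only [Option.getD_some] at hx'
        exact pvCC_trans graph hmcc ((hinv.2 m s' hq).2.2 x hx')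

theorem pv_step_false (graph : List (Int × List Int)) (M : PySem.Dict Int (PySem.Set Int))
    (hinv : pvInvB graph M) (hf : (pvStep M).2 = false) :
    (pvStep M).1 = M ∧
    (∀ k s, M.get? k = some s → ∀ m ∈ s, ∀ x, x ∈ M.getD m PySem.Set.empty → x ∈ s) := by
  have hkn : M.keys.Nodup := hinv.1 ▸ PySem.Dict.nodup_keys_ofList graph
  rw [pv_step_flag] at hf
  have hall : ∀ kv ∈ M.items, pvTT M kv = kv.2 := by
    intro kv hkv
    have hb := List.any_eq_false.1 hf kv hkv
    have hb' : (PySem.Set.len (pvTT M kv) == PySem.Set.len kv.2) = true := by simpa using hb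
    have hlen : (pvTT M kv).length = kv.2.length := (pv_len_eq_iff _ _).1 hb'
    have hnd2 : kv.2.Nodup :=
      (hinv.2 kv.1 kv.2 (PySem.Dict.get?_of_mem_items M hkv hkn)).1
    exact pv_pvTT_eq_self M kv hnd2 hlen
  constructor
  · apply PySem.Dict.ext
    rw [pv_step_items M hkn]
    rw [List.map_congr_left (fun kv hkv => by rw [hall kv hkv])]
    simp
  · intro k s hk m hm x hx
    have hkv : (k, s) ∈ M.items := PySem.Dict.mem_items_of_get?_eq_some _ hk
    have hts : pvTT M (k, s) = s := hall (k, s) hkv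
    rw [← hts]
    exact (pv_mem_pvTT M (k, s) x).2 (Or.inr ⟨m, hm, hx⟩)

def pvSmB (M : PySem.Dict Int (PySem.Set Int)) : Nat :=
  (M.items.map (fun kv => kv.2.length)).sum

theorem pv_step_true_lt (graph : List (Int × List Int)) (M : PySem.Dict Int (PySem.Set Int))
    (hinv : pvInvB graph M) (hf : (pvStep M).2 = true) : pvSmB M < pvSmB (pvStep M).1 := by
  have hkn : M.keys.Nodup := hinv.1 ▸ PySem.Dict.nodup_keys_ofList graph
  unfold pvSmB
  rw [pv_step_items M hkn, List.map_map]
  have hcomp : ((fun kv : Int × PySem.Set Int => kv.2.length) ∘ (fun kv => (kv.1, pvTT M kv)))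
      = fun kv => (pvTT M kv).length := rfl
  rw [hcomp]
  rw [pv_step_flag] at hf
  obtain ⟨kv, hkv, hb⟩ := List.any_eq_true.1 hf
  have hnd2 : kv.2.Nodup :=
    (hinv.2 kv.1 kv.2 (PySem.Dict.get?_of_mem_items M hkv hkn)).1
  have hsub : ∀ x ∈ kv.2, x ∈ pvTT M kv := fun x hx => (pv_mem_pvTT M kv x).2 (Or.inl hx)
  have hb' : (PySem.Set.len (pvTT M kv) == PySem.Set.len kv.2) = false := by simpa using hb
  have hne : (pvTT M kv).length ≠ kv.2.length := by
    intro he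
    have h := (pv_len_eq_iff _ _).2 he
    rw [hb'] at h
    cases h
  have hlt : kv.2.length < (pvTT M kv).length :=
    lt_of_le_of_ne (List.Subperm.length_le (hnd2.subperm hsub)) (fun he => hne he.symm)
  refine pv_sum_lt_sum_of_mem M.items _ _ ?_ hkv hlt
  intro a ha
  have hnda : a.2.Nodup :=
    (hinv.2 a.1 a.2 (PySem.Dict.get?_of_mem_items M ha hkn)).1
  exact List.Subperm.length_le (hnda.subperm (fun x hx => (pv_mem_pvTT M a x).2 (Or.inl hx)))

theorem pv_pvSmB_le (graph : List (Int × List Int)) (M : PySem.Dict Int (PySem.Set Int))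
    (hinv : pvInvB graph M) :
    pvSmB M ≤ (PySem.Dict.ofList graph).keys.length * pvSumLens graph := by
  have hkn : M.keys.Nodup := hinv.1 ▸ PySem.Dict.nodup_keys_ofList graph
  unfold pvSmB
  have hterm : ∀ y ∈ M.items.map (fun kv => kv.2.length), y ≤ pvSumLens graph := by
    intro y hy
    obtain ⟨kv, hkv, rfl⟩ := List.mem_map.1 hy
    have hp := hinv.2 kv.1 kv.2 (PySem.Dict.get?_of_mem_items M hkv hkn)
    have h1 : kv.2.length ≤ (pvUniv graph).length := by
      refine List.Subperm.length_le (hp.1.subperm ?_)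
      intro x hx
      exact (PySem.Set.mem_ofList _ x).2
        (pvC_subset_raw graph (pvFuel graph) kv.1 x (hp.2.2 x hx))
    have h2 := PySem.Set.length_ofList_le (pvRawNbrs graph)
    rw [pv_rawNbrs_len] at h2
    exact le_trans h1 h2
  have h2 := List.sum_le_card_nsmul _ _ hterm
  have hlen : M.items.length = (PySem.Dict.ofList graph).keys.length := by
    rw [← hinv.1]
    unfold PySem.Dict.keys
    rw [List.length_map]
  rw [List.length_map, hlen] at h2
  simpa [smul_eq_mul] using h2

def pvGoodB (graph : List (Int × List Int)) (M : PySem.Dict Int (PySem.Set Int)) : Prop :=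
  pvInvB graph M ∧
  ∀ k s, M.get? k = some s → ∀ m ∈ s, ∀ x, x ∈ M.getD m PySem.Set.empty → x ∈ s

theorem pv_loopB_ok (graph : List (Int × List Int)) :
    ∀ (fuel : Nat) (M : PySem.Dict Int (PySem.Set Int)), pvInvB graph M →
      (PySem.Dict.ofList graph).keys.length * pvSumLens graph < fuel + pvSmB M →
      pvGoodB graph (pvLoopB fuel M) := by
  intro fuel
  induction fuel with
  | zero =>
    intro M hinv hlt
    exact absurd (pv_pvSmB_le graph M hinv) (by omega)
  | succ fuel ih =>
    intro M hinv hlt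
    show pvGoodB graph (if (pvStep M).2 then pvLoopB fuel (pvStep M).1 else (pvStep M).1)
    cases hf : (pvStep M).2 with
    | true =>
      rw [if_pos rfl]
      refine ih (pvStep M).1 (pv_invB_step graph M hinv) ?_
      have := pv_step_true_lt graph M hinv hf
      omega
    | false =>
      rw [if_neg (by simp)]
      rw [(pv_step_false graph M hinv hf).1]
      exact ⟨hinv, (pv_step_false graph M hinv hf).2⟩

theorem pv_good_complete (graph : List (Int × List Int)) (M : PySem.Dict Int (PySem.Set Int))
    (hg : pvGoodB graph M) :
    ∀ (f : Nat) (k : Int) (s : PySem.Set Int), M.get? k = some s →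
      ∀ x, x ∈ pvC (PySem.Dict.ofList graph) f k → x ∈ s := by
  intro f
  induction f with
  | zero => intro k s _ x hx; cases hx
  | succ f ih =>
    intro k s hk x hx
    rw [pv_mem_pvC_succ] at hx
    obtain ⟨nb, h1, h2⟩ := hx
    have hnb : nb ∈ s := (hg.1.2 k s hk).2.1 nb h1
    rcases h2 with rfl | h2
    · exact hnb
    · cases hq : M.get? nb with
      | some s' =>
        have hx' := ih nb s' hq x h2
        refine hg.2 k s hk nb hnb x ?_
        rw [PySem.Dict.getD_eq_get?_getD, hq]
        simpa using hx'
      | none =>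
        have hcon : M.contains nb = false :=
          (PySem.Dict.get?_eq_none_iff_contains M nb).1 hq
        have hnk : nb ∉ M.keys := by
          intro hmem
          rw [(PySem.Dict.contains_iff_mem_keys M nb).2 hmem] at hcon
          cases hcon
        rw [hg.1.1] at hnk
        rw [pvC_of_not_mem_keys _ hnk] at h2
        cases h2

theorem pv_B_eq (graph : List (Int × List Int)) :
    compute_dependencies_length_old_alt graph =
      (PySem.Dict.ofList graph).keys.map (fun k => (k, ((pvCC graph k).length : Int))) := by
  have hgnd : ((PySem.Dict.ofList graph).items.map
      (fun (p : Int × List Int) => p.1)).Nodup := PySem.Dict.nodup_keys_ofList graph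
  have hM0items : ((PySem.Dict.ofList graph).items.foldl
      (fun (d : PySem.Dict Int (PySem.Set Int)) kv => d.insert kv.1 (PySem.Set.ofList kv.2))
      PySem.Dict.empty).items
      = (PySem.Dict.ofList graph).items.map (fun kv => (kv.1, PySem.Set.ofList kv.2)) := by
    have h := pv_items_foldl_insert_map (fun (kv : Int × List Int) => PySem.Set.ofList kv.2)
      (PySem.Dict.ofList graph).items PySem.Dict.empty hgnd
      (fun kv _ => PySem.Dict.contains_empty kv.1)
    simpa using h
  set M0 := (PySem.Dict.ofList graph).items.foldl
      (fun (d : PySem.Dict Int (PySem.Set Int)) kv => d.insert kv.1 (PySem.Set.ofList kv.2))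
      PySem.Dict.empty with hM0
  have hM0inv : pvInvB graph M0 := by
    constructor
    · unfold PySem.Dict.keys
      rw [hM0items, List.map_map]
      rfl
    · intro k s hk
      have hmem := PySem.Dict.mem_items_of_get?_eq_some _ hk
      rw [hM0items] at hmem
      obtain ⟨kv, hkv, heq⟩ := List.mem_map.1 hmem
      have h1 : kv.1 = k := congrArg Prod.fst heq
      have h2 : PySem.Set.ofList kv.2 = s := congrArg Prod.snd heq
      have hMk : (PySem.Dict.ofList graph).get? kv.1 = some kv.2 :=
        PySem.Dict.get?_of_mem_items _ hkv (PySem.Dict.nodup_keys_ofList graph)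
      have hsucc : pvSucc (PySem.Dict.ofList graph) kv.1 = kv.2 := by
        unfold pvSucc
        rw [PySem.Dict.getD_eq_get?_getD, hMk]
        rfl
      subst h1
      rw [← h2]
      refine ⟨PySem.Set.nodup_ofList _, ?_, ?_⟩
      · intro x hx
        rw [hsucc] at hx
        exact (PySem.Set.mem_ofList _ x).2 hx
      · intro x hx
        have hx' : x ∈ kv.2 := (PySem.Set.mem_ofList _ x).1 hx
        exact (pv_mem_pvCC_iff graph kv.1 x).2 ⟨x, by rw [hsucc]; exact hx', Or.inl rfl⟩
  have hgood := pv_loopB_ok graph (graph.length * pvSumLens graph + 2) M0 hM0inv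
    (by
      have h1 := pv_keys_len_le graph
      have h2 := Nat.mul_le_mul_right (pvSumLens graph) h1
      omega)
  set R := pvLoopB (graph.length * pvSumLens graph + 2) M0 with hR
  have hRk : R.keys = (PySem.Dict.ofList graph).keys := hgood.1.1
  have hRnd : R.keys.Nodup := by rw [hRk]; exact PySem.Dict.nodup_keys_ofList graph
  have hptw : ∀ kv ∈ R.items, ((kv.1 : Int), PySem.Set.len kv.2)
      = (kv.1, ((pvCC graph kv.1).length : Int)) := by
    intro kv hkv
    have hq : R.get? kv.1 = some kv.2 := PySem.Dict.get?_of_mem_items R hkv hRnd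
    have hsound := (hgood.1.2 kv.1 kv.2 hq).2.2
    have hcompl := pv_good_complete graph R hgood (pvFuel graph) kv.1 kv.2 hq
    have hlen : kv.2.length = (pvCC graph kv.1).length :=
      pv_length_eq_of_mem_iff (hgood.1.2 kv.1 kv.2 hq).1 (pv_nodup_pvC _ _ _)
        (fun x => ⟨fun hx => hsound x hx, fun hx => hcompl x hx⟩)
    unfold PySem.Set.len
    rw [hlen]
  show R.items.map (fun kv => (kv.1, PySem.Set.len kv.2)) = _
  rw [List.map_congr_left hptw]
  have : R.items.map (fun kv => ((kv.1 : Int), ((pvCC graph kv.1).length : Int)))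
      = R.keys.map (fun k => (k, ((pvCC graph k).length : Int))) := by
    unfold PySem.Dict.keys
    rw [List.map_map]
    rfl
  rw [this, hRk]

-- ===== VERDICT (by name: the statement is the Claim_ definition above) =====
theorem compute_dependencies_length_old_spec : Claim_equal_compute_dependencies_length_old := by
  intro graph _ hpre
  unfold Spec_compute_dependencies_length_old
  rw [pv_A_eq graph hpre, pv_B_eq graph]
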